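-- pv_equiv track=rewrite | github.com/tabrizgulmammadov/adventofcode-daily-problems | seventh-day-problem/main.py | is_valid_operation
-- ===== SOURCE A (Python) =====
-- def is_valid_operation(operation: tuple[int, list[int]], is_part2: bool) -> bool:
--     target, operands = operation
--     # Use a set to avoid duplicate results
--     current_results = set([operands[0]])
--
--     for operand in operands[1:]:
--         next_results = set()
--         for res in current_results:
--             # Add both possible operations (+ and *) if they don't exceed the target
--             if res + operand <= target:
--                 next_results.add(res + operand)
--             if res * operand <= target:
--                 next_results.add(res * operand)
--             if is_part2 and int(f'{res}{operand}') <= target: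
--                 next_results.add(int(f'{res}{operand}'))
--         # If no new results are generated, the operation cannot reach the target
--         if not next_results:
--             return False
--         current_results = next_results
--
--     return target in current_results
-- ===== SOURCE B (Python) =====
-- def is_valid_operation(operation: tuple[int, list[int]], is_part2: bool) -> bool:
--     target, operands = operation
--
--     def dfs(val, rest):
--         if not rest:
--             return val == target
--         o = rest[0]
--         tail = rest[1:]
--         if val + o <= target and dfs(val + o, tail):
--             return True
--         if val * o <= target and dfs(val * o, tail):
--             return True
--         if is_part2:
--             c = int(f'{val}{o}')
--             if c <= target and dfs(c, tail):
--                 return True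
--         return False
--
--     return dfs(operands[0], operands[1:])
-- ===== Notes on version B (the rewrite author's own statement) =====
-- stated objective: simpler
-- what changed: Replaces the level-by-level BFS that materialises a deduplicated set of all reachable intermediate values per operand with a short-circuiting recursive DFS over operator choices that keeps no set at all and stops at the first operator sequence reaching the target.
-- outside the precondition, e.g. on is_valid_operation((-10, [1, 1, -1]), True): A returns False, B returns False
import Mathlib
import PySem

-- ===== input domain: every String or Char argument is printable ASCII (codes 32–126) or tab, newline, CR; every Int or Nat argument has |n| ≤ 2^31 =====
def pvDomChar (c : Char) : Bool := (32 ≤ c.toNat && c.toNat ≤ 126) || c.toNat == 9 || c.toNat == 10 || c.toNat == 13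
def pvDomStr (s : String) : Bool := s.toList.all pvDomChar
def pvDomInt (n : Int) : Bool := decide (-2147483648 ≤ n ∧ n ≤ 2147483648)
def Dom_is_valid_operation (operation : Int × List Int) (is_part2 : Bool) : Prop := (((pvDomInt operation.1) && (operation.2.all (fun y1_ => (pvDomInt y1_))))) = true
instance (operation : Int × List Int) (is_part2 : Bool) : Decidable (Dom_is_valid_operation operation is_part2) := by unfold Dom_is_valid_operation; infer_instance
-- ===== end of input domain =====

-- B replaces A's level-by-level set BFS with a short-circuiting recursive DFS over operator
-- choices (no set of intermediate results is kept): simpler, same return value on all of Pre_.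


-- ===== PORT A =====
-- int(f'{res}{operand}'): none is exactly where Python raises ValueError (negative operand)
def pvConcat? (a b : Int) : Option Int :=
  PySem.Int.ofChars? (PySem.Int.toChars a ++ PySem.Int.toChars b)

-- body of A's inner 'for res in current_results' loop
def pvStepA (target operand : Int) (is_part2 : Bool) (nxt : PySem.Set Int) (res : Int) : PySem.Set Int :=
  let n1 := if res + operand ≤ target then PySem.Set.add nxt (res + operand) else nxt
  let n2 := if res * operand ≤ target then PySem.Set.add n1 (res * operand) else n1
  if is_part2 then
    match pvConcat? res operand with
    | some c => if c ≤ target then PySem.Set.add n2 c else n2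
    | none => n2          -- Python raises ValueError here; outside Pre_
  else n2

-- A's outer 'for operand in operands[1:]' loop; none = the early 'return False'
def pvLoopA (target : Int) (is_part2 : Bool) (l : List Int) (cur : PySem.Set Int) : Option (PySem.Set Int) :=
  match l with
  | [] => some cur
  | operand :: rest =>
    let next := cur.foldl (pvStepA target operand is_part2) PySem.Set.empty
    if next = [] then none else pvLoopA target is_part2 rest next

def is_valid_operation (operation : Int × List Int) (is_part2 : Bool) : Bool :=
  let target := operation.1
  let operands := operation.2
  match PySem.List.pyGet? operands 0 with
  | none => false           -- IndexError on empty operands; outside Pre_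
  | some o0 =>
    match pvLoopA target is_part2 (PySem.List.slice operands (some 1) none) (PySem.Set.ofList [o0]) with
    | none => false
    | some s => PySem.Set.contains s target

-- ===== PORT B =====
def pvDfs (target : Int) (is_part2 : Bool) (val : Int) (rest : List Int) : Bool :=
  match rest with
  | [] => val == target
  | o :: tail =>
    (decide (val + o ≤ target) && pvDfs target is_part2 (val + o) tail) ||
    (decide (val * o ≤ target) && pvDfs target is_part2 (val * o) tail) ||
    (is_part2 &&
      match pvConcat? val o with
      | some c => decide (c ≤ target) && pvDfs target is_part2 c tail
      | none => false)      -- Python raises ValueError here; outside Pre_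

def is_valid_operation_alt (operation : Int × List Int) (is_part2 : Bool) : Bool :=
  match PySem.List.pyGet? operation.2 0 with
  | none => false           -- IndexError on empty operands; outside Pre_
  | some o0 => pvDfs operation.1 is_part2 o0 (PySem.List.slice operation.2 (some 1) none)

-- ===== PRECONDITION & SPEC =====
-- Pre_ excludes exactly the inputs where Python A raises: empty operands (IndexError) and, when
-- is_part2, a negative operand after the first (int(f'{res}{operand}') raises ValueError as soon
-- as such an operand is reached with a nonempty result set; in the rare case the set empties
-- first, A returns False — and B returns False there too, see the cite).
def Pre_is_valid_operation (operation : Int × List Int) (is_part2 : Bool) : Prop :=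
  operation.2 ≠ [] ∧ (is_part2 = true → ∀ o ∈ operation.2.drop 1, 0 ≤ o)
instance (operation : Int × List Int) (is_part2 : Bool) : Decidable (Pre_is_valid_operation operation is_part2) := by unfold Pre_is_valid_operation; infer_instance

def pvWitness_is_valid_operation : (Int × List Int) × Bool := ((6, [2, 3]), true)

def Spec_is_valid_operation (operation : Int × List Int) (is_part2 : Bool) (out : Bool) : Prop := out = is_valid_operation_alt operation is_part2
instance (operation : Int × List Int) (is_part2 : Bool) (out : Bool) : Decidable (Spec_is_valid_operation operation is_part2 out) := by unfold Spec_is_valid_operation; infer_instance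

-- ===== CLAIM (what is proved, stated in full; the proofs are below) =====
def Claim_equal_is_valid_operation : Prop := ∀ (operation : Int × List Int) (is_part2 : Bool), Dom_is_valid_operation operation is_part2 → Pre_is_valid_operation operation is_part2 → Spec_is_valid_operation operation is_part2 (is_valid_operation operation is_part2)

-- ===== LEMMAS AND PROOFS =====

-- the values pvStepA contributes for source value res (membership view)
def pvCand (target operand : Int) (is_part2 : Bool) (res w : Int) : Prop :=
  (w = res + operand ∧ res + operand ≤ target) ∨
  (w = res * operand ∧ res * operand ≤ target) ∨
  (is_part2 = true ∧ ∃ c, pvConcat? res operand = some c ∧ w = c ∧ c ≤ target)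

lemma mem_pvStepA {target operand : Int} {is_part2 : Bool} {nxt : PySem.Set Int} {res w : Int} :
    w ∈ pvStepA target operand is_part2 nxt res ↔ w ∈ nxt ∨ pvCand target operand is_part2 res w := by
  unfold pvStepA pvCand
  cases hb : is_part2 <;> cases hc : pvConcat? res operand <;>
    simp only [hc, Bool.false_eq_true, false_and, or_false, true_and, if_true, if_false,
      Option.some.injEq, reduceCtorEq, exists_false, exists_eq_left'] <;>
    split_ifs <;>
    (try simp only [PySem.Set.mem_add]) <;>
    tauto

lemma mem_foldl_pvStepA {target operand : Int} {is_part2 : Bool} (l : List Int)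
    (acc : PySem.Set Int) (w : Int) :
    w ∈ l.foldl (pvStepA target operand is_part2) acc ↔
      w ∈ acc ∨ ∃ r ∈ l, pvCand target operand is_part2 r w := by
  induction l generalizing acc with
  | nil => simp
  | cons r rest ih =>
    simp only [List.foldl_cons, ih, mem_pvStepA, List.mem_cons]
    constructor
    · rintro (( h | h) | ⟨x, hx, hc⟩)
      · exact Or.inl h
      · exact Or.inr ⟨r, Or.inl rfl, h⟩
      · exact Or.inr ⟨x, Or.inr hx, hc⟩
    · rintro (h | ⟨x, (rfl | hx), hc⟩)
      · exact Or.inl (Or.inl h)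
      · exact Or.inl (Or.inr hc)
      · exact Or.inr ⟨x, hx, hc⟩

-- unfolding of pvDfs on a cons, in membership form
lemma pvDfs_cons_iff {target : Int} {is_part2 : Bool} (val o : Int) (tail : List Int) :
    pvDfs target is_part2 val (o :: tail) = true ↔
      ∃ w, pvCand target o is_part2 val w ∧ pvDfs target is_part2 w tail = true := by
  cases hb : is_part2 <;> cases hc : pvConcat? val o <;>
    simp [pvDfs, pvCand, hc] <;> aesop

-- core invariant: A's remaining loop over l starting from set cur answers the same as
-- "some value of cur completes via DFS"
lemma pvLoopA_eq_any (target : Int) (is_part2 : Bool) (l : List Int) :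
    ∀ (cur : PySem.Set Int),
      (match pvLoopA target is_part2 l cur with
       | none => false
       | some s => PySem.Set.contains s target) =
      cur.any (fun v => pvDfs target is_part2 v l) := by
  induction l with
  | nil =>
    intro cur
    simp only [pvLoopA]
    simp only [pvDfs]
    rw [Bool.eq_iff_iff]
    simp only [List.any_eq_true, beq_iff_eq, PySem.Set.contains,
      List.contains_iff_mem]
    exact ⟨fun h => ⟨target, h, rfl⟩, fun ⟨v, hv, he⟩ => he ▸ hv⟩
  | cons o rest ih =>
    intro cur
    simp only [pvLoopA]
    have hany : (cur.foldl (pvStepA target o is_part2) PySem.Set.empty).any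
        (fun w => pvDfs target is_part2 w rest) =
        cur.any (fun v => pvDfs target is_part2 v (o :: rest)) := by
      rw [Bool.eq_iff_iff]
      simp only [List.any_eq_true]
      constructor
      · rintro ⟨w, hw, hd⟩
        rw [mem_foldl_pvStepA] at hw
        rcases hw with h | ⟨r, hr, hc⟩
        · simp [PySem.Set.empty] at h
        · exact ⟨r, hr, (pvDfs_cons_iff r o rest).2 ⟨w, hc, hd⟩⟩
      · rintro ⟨v, hv, hd⟩
        rcases (pvDfs_cons_iff v o rest).1 hd with ⟨w, hc, hdw⟩
        exact ⟨w, (mem_foldl_pvStepA cur PySem.Set.empty w).2 (Or.inr ⟨v, hv, hc⟩), hdw⟩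
    by_cases hnil : cur.foldl (pvStepA target o is_part2) PySem.Set.empty = []
    · simp only [hnil, reduceIte]
      rw [← hany, hnil]
      simp
    · simp only [if_neg hnil]
      rw [ih, hany]

-- ===== VERDICT (by name: the statement is the Claim_ definition above) =====
theorem is_valid_operation_spec : Claim_equal_is_valid_operation := by
  intro operation is_part2 _hdom _hpre
  unfold Spec_is_valid_operation is_valid_operation is_valid_operation_alt
  cases h : PySem.List.pyGet? operation.2 0 with
  | none => simp only [h]
  | some o0 =>
    simp only [h]
    rw [pvLoopA_eq_any]
    simp [PySem.Set.ofList]
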